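-- pv_equiv track=rewrite | github.com/genropy/genropy | gnrpy/gnr/web/gnrwebpage_proxy/apphandler/export.py | _printCellStyle
-- ===== SOURCE A (Python) =====
-- from typing import Any, Optional
--
-- def _printCellStyle(colAttr: dict[str, Any]) -> str:
--     """Extract CSS style string from column attributes.
--
--     Args:
--         colAttr: Dictionary of column attributes that may contain
--             CSS-like keys (e.g. ``width``, ``color``, ``border``).
--
--     Returns:
--         A CSS style string.
--     """
--     style = [colAttr.get('style')]
--     styleAttrNames = ('height', 'width', 'top', 'left', 'right', 'bottom',
--                       'visibility', 'overflow', 'float', 'clear', 'display',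
--                       'z_index', 'border', 'position', 'padding', 'margin',
--                       'color', 'white_space', 'vertical_align')
--
--     def isStyleAttr(name: str) -> bool:
--         for st in styleAttrNames:
--             if name == st or name.startswith('%s_' % st):
--                 return True
--
--     for k, v in list(colAttr.items()):
--         if isStyleAttr(k):
--             style.append('%s: %s;' % (k.replace('_', '-'), v))
--     style = ' '.join([v for v in style if v])
--     return style
-- ===== SOURCE B (Python) =====
-- STYLE_NAMES = frozenset(('height', 'width', 'top', 'left', 'right', 'bottom',
--                          'visibility', 'overflow', 'float', 'clear', 'display',
--                          'z_index', 'border', 'position', 'padding', 'margin',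
--                          'color', 'white_space', 'vertical_align'))
--
--
-- def _underscore_prefixes(name):
--     """All underscore-boundary prefixes of name, shortest first."""
--     prefs = []
--     upto = ''
--     for ch in name:
--         if ch == '_':
--             prefs.append(upto)
--         upto += ch
--     prefs.append(upto)
--     return prefs
--
--
-- def _printCellStyle(colAttr):
--     entries = ['%s: %s;' % (k.replace('_', '-'), v)
--                for k, v in colAttr.items()
--                if any(p in STYLE_NAMES for p in _underscore_prefixes(k))]
--     style = [colAttr.get('style')] + entries
--     return ' '.join(s for s in style if s)
-- ===== Notes on version B (the rewrite author's own statement) =====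
-- stated objective: faster
-- what changed: Instead of scanning the 19 style names per key with equality/startswith tests, B generates each key's underscore-boundary cumulative prefixes in one pass over the key and tests them for membership in a frozenset of the names, collecting entries with a comprehension.
import Mathlib
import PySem

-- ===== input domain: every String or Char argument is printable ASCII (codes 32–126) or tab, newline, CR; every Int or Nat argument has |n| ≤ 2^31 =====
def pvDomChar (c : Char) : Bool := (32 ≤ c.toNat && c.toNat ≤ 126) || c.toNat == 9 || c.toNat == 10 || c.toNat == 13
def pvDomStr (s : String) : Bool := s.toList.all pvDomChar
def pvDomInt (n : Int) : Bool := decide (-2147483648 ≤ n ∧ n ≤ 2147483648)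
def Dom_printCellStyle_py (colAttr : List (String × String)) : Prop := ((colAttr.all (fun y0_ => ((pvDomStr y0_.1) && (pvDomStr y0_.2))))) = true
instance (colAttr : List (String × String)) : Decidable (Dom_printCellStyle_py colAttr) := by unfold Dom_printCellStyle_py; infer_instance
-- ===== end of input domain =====

-- B replaces the 19-name scan per key by generating the key's underscore-boundary
-- prefixes once and testing them against a frozenset (objective: faster, constant-factor; measured).

-- ===== PORT A =====
def pvStyleNames : List String :=
  ["height", "width", "top", "left", "right", "bottom",
   "visibility", "overflow", "float", "clear", "display",
   "z_index", "border", "position", "padding", "margin",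
   "color", "white_space", "vertical_align"]

def pvIsStyleAttr (name : String) : Bool :=
  pvStyleNames.any (fun st => name == st || PySem.Str.startswith name (st ++ "_"))

def printCellStyle_py (colAttr : List (String × String)) : String :=
  let d := PySem.Dict.ofList colAttr
  let style : List (Option String) := [d.get? "style"]
  let style := d.items.foldl (fun acc kv =>
    if pvIsStyleAttr kv.1 then
      acc ++ [some (PySem.Str.replace kv.1 "_" "-" ++ ": " ++ kv.2 ++ ";")]
    else acc) style
  PySem.Str.join " " (style.filterMap (fun o => o.bind (fun s => if s == "" then none else some s)))

-- ===== PORT B =====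
def pvStyleSet : PySem.Set String := PySem.Set.ofList pvStyleNames

-- the loop of _underscore_prefixes: state (prefs, upto), one step per character
def pvUPrefGo (prefs : List (List Char)) (upto : List Char) : List Char → List (List Char)
  | [] => prefs ++ [upto]
  | c :: t => pvUPrefGo (if c = '_' then prefs ++ [upto] else prefs) (upto ++ [c]) t

def pvUnderscorePrefixes (name : String) : List String :=
  (pvUPrefGo [] [] name.toList).map String.ofList

def pvIsStyleAttrB (name : String) : Bool :=
  (pvUnderscorePrefixes name).any (fun p => PySem.Set.contains pvStyleSet p)

def printCellStyle_py_alt (colAttr : List (String × String)) : String :=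
  let d := PySem.Dict.ofList colAttr
  let entries := (d.items.filter (fun kv => pvIsStyleAttrB kv.1)).map
    (fun kv => PySem.Str.replace kv.1 "_" "-" ++ ": " ++ kv.2 ++ ";")
  let style : List (Option String) := d.get? "style" :: entries.map some
  PySem.Str.join " " (style.filterMap (fun o => o.bind (fun s => if s == "" then none else some s)))

-- ===== PRECONDITION & SPEC =====
def Spec_printCellStyle_py (colAttr : List (String × String)) (out : String) : Prop := out = printCellStyle_py_alt colAttr
instance (colAttr : List (String × String)) (out : String) : Decidable (Spec_printCellStyle_py colAttr out) := by unfold Spec_printCellStyle_py; infer_instance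

-- ===== CLAIM (what is proved, stated in full; the proofs are below) =====
def Claim_equal_printCellStyle_py : Prop := ∀ (colAttr : List (String × String)), Dom_printCellStyle_py colAttr → Spec_printCellStyle_py colAttr (printCellStyle_py colAttr)

-- ===== LEMMAS AND PROOFS =====

-- recursive characterisation of the underscore-boundary prefixes
def pvCps : List Char → List (List Char)
  | [] => [[]]
  | c :: t => if c = '_' then [] :: (pvCps t).map (c :: ·) else (pvCps t).map (c :: ·)

theorem pvUPrefGo_eq (l : List Char) : ∀ (prefs : List (List Char)) (upto : List Char),
    pvUPrefGo prefs upto l = prefs ++ (pvCps l).map (upto ++ ·) := by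
  induction l with
  | nil => intro prefs upto; simp [pvUPrefGo, pvCps]
  | cons c t ih =>
      intro prefs upto
      by_cases hc : c = '_' <;>
        simp [pvUPrefGo, pvCps, hc, ih, List.map_map, Function.comp_def, List.append_assoc]

theorem mem_pvCps (l : List Char) : ∀ (s : List Char),
    s ∈ pvCps l ↔ s = l ∨ s ++ ['_'] <+: l := by
  induction l with
  | nil => intro s; simp [pvCps]
  | cons c t ih =>
      intro s
      by_cases hc : c = '_'
      · subst hc
        cases s with
        | nil => simp [pvCps, List.cons_prefix_cons]
        | cons a r =>
            simp [pvCps, ih, List.cons_prefix_cons]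
            aesop
      · cases s with
        | nil =>
            simp only [pvCps, if_neg hc]
            simp [List.cons_prefix_cons, Ne.symm hc]
        | cons a r =>
            simp only [pvCps, if_neg hc, List.mem_map, List.cons.injEq,
              List.cons_append, List.cons_prefix_cons]
            constructor
            · rintro ⟨x, hx, rfl, rfl⟩
              rcases (ih x).1 hx with h | h
              · exact Or.inl ⟨rfl, h⟩
              · exact Or.inr ⟨rfl, h⟩
            · rintro (⟨rfl, rfl⟩ | ⟨rfl, h⟩)
              · exact ⟨r, (ih r).2 (Or.inl rfl), rfl, rfl⟩
              · exact ⟨r, (ih r).2 (Or.inr h), rfl, rfl⟩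

theorem mem_prefixes_iff (st name : String) :
    st ∈ pvUnderscorePrefixes name ↔
      (name = st ∨ st.toList ++ ['_'] <+: name.toList) := by
  unfold pvUnderscorePrefixes
  rw [pvUPrefGo_eq]
  simp only [List.mem_map]
  constructor
  · rintro ⟨c, hc, rfl⟩
    rcases (mem_pvCps _ c).1 (by simpa using hc) with rfl | h
    · exact Or.inl (by simp)
    · exact Or.inr (by simpa using h)
  · rintro (rfl | h)
    · exact ⟨name.toList, by simpa using (mem_pvCps _ name.toList).2 (Or.inl rfl), by simp⟩
    · exact ⟨st.toList, by simpa using (mem_pvCps _ st.toList).2 (Or.inr h), by simp⟩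

theorem pred_eq (name : String) : pvIsStyleAttr name = pvIsStyleAttrB name := by
  unfold pvIsStyleAttr pvIsStyleAttrB pvStyleSet
  rw [Bool.eq_iff_iff]
  simp only [List.any_eq_true, Bool.or_eq_true, beq_iff_eq,
    PySem.Str.startswith_eq, PySem.Chars.startswith_iff, PySem.Set.contains_iff,
    PySem.Set.mem_ofList, String.toList_append, mem_prefixes_iff,
    show "_".toList = ['_'] by decide]
  exact ⟨fun ⟨x, h1, h2⟩ => ⟨x, h2, h1⟩, fun ⟨x, h2, h1⟩ => ⟨x, h1, h2⟩⟩

-- ===== VERDICT (by name: the statement is the Claim_ definition above) =====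
theorem printCellStyle_py_spec : Claim_equal_printCellStyle_py := by
  intro colAttr _
  unfold Spec_printCellStyle_py printCellStyle_py printCellStyle_py_alt
  simp only [PySem.List.foldl_append_if]
  simp only [pred_eq]
  congr 1
  generalize (PySem.Dict.ofList colAttr).get? "style" = o
  rcases o with _ | s
  · simp
  · by_cases hs : s = "" <;> simp [hs]
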